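-- pv_equiv track=rewrite | github.com/ethankalkwarf/mixwise-second | scripts/enrich_cocktails.py | get_base_spirit
-- ===== SOURCE A (Python) =====
-- def get_base_spirit(name, ingredients_hint=""):
--     """Determine base spirit from name and ingredients."""
--     name_lower = name.lower()
--     ing_lower = ingredients_hint.lower()
--
--     if any(x in name_lower or x in ing_lower for x in ['vodka', 'russian', 'moscow', 'bloody mary', 'espresso martini', 'cosmopolitan']):
--         return 'Vodka'
--     if any(x in name_lower or x in ing_lower for x in ['gin', 'martini', 'negroni', 'tom collins', 'aviation', 'gimlet']):
--         return 'Gin'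
--     if any(x in name_lower or x in ing_lower for x in ['rum', 'mojito', 'daiquiri', 'mai tai', 'pina colada', 'cuba']):
--         return 'Rum'
--     if any(x in name_lower or x in ing_lower for x in ['whiskey', 'whisky', 'bourbon', 'rye', 'scotch', 'manhattan', 'old fashioned', 'mint julep']):
--         return 'Whiskey'
--     if any(x in name_lower or x in ing_lower for x in ['tequila', 'mezcal', 'margarita', 'paloma']):
--         return 'Tequila'
--     if any(x in name_lower or x in ing_lower for x in ['brandy', 'cognac', 'sidecar']):
--         return 'Brandy'
--     if any(x in name_lower or x in ing_lower for x in ['champagne', 'prosecco', 'bellini', 'mimosa', 'french 75']):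
--         return 'Champagne'
--     if any(x in name_lower or x in ing_lower for x in ['aperol', 'campari', 'americano']):
--         return 'Aperitif'
--
--     return 'Spirit'
-- ===== SOURCE B (Python) =====
-- # Substring-indexed scan: instead of testing each keyword for containment, walk every
-- # position of the lowered texts, look up the window text[i:i+L] in a keyword->priority
-- # hash for each keyword length L, and keep the minimum priority seen.
--
-- KW = {
--     'vodka': 0, 'russian': 0, 'moscow': 0, 'bloody mary': 0, 'espresso martini': 0, 'cosmopolitan': 0,
--     'gin': 1, 'martini': 1, 'negroni': 1, 'tom collins': 1, 'aviation': 1, 'gimlet': 1,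
--     'rum': 2, 'mojito': 2, 'daiquiri': 2, 'mai tai': 2, 'pina colada': 2, 'cuba': 2,
--     'whiskey': 3, 'whisky': 3, 'bourbon': 3, 'rye': 3, 'scotch': 3, 'manhattan': 3,
--     'old fashioned': 3, 'mint julep': 3,
--     'tequila': 4, 'mezcal': 4, 'margarita': 4, 'paloma': 4,
--     'brandy': 5, 'cognac': 5, 'sidecar': 5,
--     'champagne': 6, 'prosecco': 6, 'bellini': 6, 'mimosa': 6, 'french 75': 6,
--     'aperol': 7, 'campari': 7, 'americano': 7,
-- }
-- LENS = sorted({len(k) for k in KW})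
-- LABELS = ['Vodka', 'Gin', 'Rum', 'Whiskey', 'Tequila', 'Brandy', 'Champagne', 'Aperitif', 'Spirit']
--
--
-- def get_base_spirit(name, ingredients_hint=""):
--     """Determine base spirit by sliding fixed-length windows over the texts."""
--     best = 8
--     for text in (name.lower(), ingredients_hint.lower()):
--         for i in range(len(text)):
--             for L in LENS:
--                 p = KW.get(text[i:i + L])
--                 if p is not None and p < best:
--                     best = p
--     return LABELS[best]
-- ===== Notes on version B (the rewrite author's own statement) =====
-- stated objective: alternative
-- what changed: A tests each of 41 keywords for substring containment in either field; B instead slides fixed-length windows over each lowered text, looks every window up in a keyword-to-priority hash, and keeps the minimum priority, so the keyword set is probed per text position instead of scanned per keyword.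
import Mathlib
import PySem

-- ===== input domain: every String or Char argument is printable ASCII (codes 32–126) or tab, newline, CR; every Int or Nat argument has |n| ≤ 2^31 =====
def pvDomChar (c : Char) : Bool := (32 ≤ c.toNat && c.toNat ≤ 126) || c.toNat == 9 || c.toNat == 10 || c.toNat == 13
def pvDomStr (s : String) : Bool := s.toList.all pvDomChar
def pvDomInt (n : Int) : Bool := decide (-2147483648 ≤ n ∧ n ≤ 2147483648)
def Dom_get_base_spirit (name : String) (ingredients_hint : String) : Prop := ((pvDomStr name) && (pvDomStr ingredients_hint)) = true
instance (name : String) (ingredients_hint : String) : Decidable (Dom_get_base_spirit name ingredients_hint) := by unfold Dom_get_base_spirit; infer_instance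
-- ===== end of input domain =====

-- B replaces A's eight keyword-containment checks by a sliding-window scan of the two
-- lowered texts: every window text[i:i+L] is looked up in a keyword→priority hash and the
-- minimum priority wins (objective: alternative algorithm, same result).

-- ===== PORT A =====
-- any(x in name_lower or x in ing_lower for x in ks)
def pvHit (nl il : String) (ks : List String) : Bool :=
  ks.any (fun x => PySem.Str.isIn x nl || PySem.Str.isIn x il)

def get_base_spirit (name : String) (ingredients_hint : String) : String :=
  let name_lower := PySem.Str.lower name
  let ing_lower := PySem.Str.lower ingredients_hint
  if pvHit name_lower ing_lower ["vodka", "russian", "moscow", "bloody mary", "espresso martini", "cosmopolitan"] then "Vodka"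
  else if pvHit name_lower ing_lower ["gin", "martini", "negroni", "tom collins", "aviation", "gimlet"] then "Gin"
  else if pvHit name_lower ing_lower ["rum", "mojito", "daiquiri", "mai tai", "pina colada", "cuba"] then "Rum"
  else if pvHit name_lower ing_lower ["whiskey", "whisky", "bourbon", "rye", "scotch", "manhattan", "old fashioned", "mint julep"] then "Whiskey"
  else if pvHit name_lower ing_lower ["tequila", "mezcal", "margarita", "paloma"] then "Tequila"
  else if pvHit name_lower ing_lower ["brandy", "cognac", "sidecar"] then "Brandy"
  else if pvHit name_lower ing_lower ["champagne", "prosecco", "bellini", "mimosa", "french 75"] then "Champagne"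
  else if pvHit name_lower ing_lower ["aperol", "campari", "americano"] then "Aperitif"
  else "Spirit"

-- ===== PORT B =====
-- KW = { keyword : priority } (Python str keys ported as List Char, compared exactly as Python compares str)
def kwDict : PySem.Dict (List Char) Nat := PySem.Dict.mk
  [("vodka".toList, 0), ("russian".toList, 0), ("moscow".toList, 0), ("bloody mary".toList, 0), ("espresso martini".toList, 0), ("cosmopolitan".toList, 0),
   ("gin".toList, 1), ("martini".toList, 1), ("negroni".toList, 1), ("tom collins".toList, 1), ("aviation".toList, 1), ("gimlet".toList, 1),
   ("rum".toList, 2), ("mojito".toList, 2), ("daiquiri".toList, 2), ("mai tai".toList, 2), ("pina colada".toList, 2), ("cuba".toList, 2),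
   ("whiskey".toList, 3), ("whisky".toList, 3), ("bourbon".toList, 3), ("rye".toList, 3), ("scotch".toList, 3), ("manhattan".toList, 3),
   ("old fashioned".toList, 3), ("mint julep".toList, 3),
   ("tequila".toList, 4), ("mezcal".toList, 4), ("margarita".toList, 4), ("paloma".toList, 4),
   ("brandy".toList, 5), ("cognac".toList, 5), ("sidecar".toList, 5),
   ("champagne".toList, 6), ("prosecco".toList, 6), ("bellini".toList, 6), ("mimosa".toList, 6), ("french 75".toList, 6),
   ("aperol".toList, 7), ("campari".toList, 7), ("americano".toList, 7)]

-- LENS = sorted({len(k) for k in KW}) — a constant in Source B, its value written out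
def lensList : List Nat := [3, 4, 5, 6, 7, 8, 9, 10, 11, 12, 13, 16]

def labelsList : List String := ["Vodka", "Gin", "Rum", "Whiskey", "Tequila", "Brandy", "Champagne", "Aperitif", "Spirit"]

-- the two inner loops: for i in range(len(text)): for L in LENS: p = KW.get(text[i:i+L]); if p is not None and p < best: best = p
def scanChars (best : Nat) (t : List Char) : Nat :=
  (List.range t.length).foldl (fun b i =>
    lensList.foldl (fun b L =>
      match kwDict.get? (PySem.List.slice t (some (Int.ofNat i)) (some (Int.ofNat i + Int.ofNat L))) with
      | some p => if p < b then p else b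
      | none => b) b) best

def get_base_spirit_alt (name : String) (ingredients_hint : String) : String :=
  let nl := PySem.Chars.lower name.toList
  let il := PySem.Chars.lower ingredients_hint.toList
  let best := scanChars (scanChars 8 nl) il
  -- LABELS[best]; best ≤ 8 always holds, so Python's IndexError branch is unreachable
  labelsList.getD best "Spirit"

-- ===== PRECONDITION & SPEC =====
def Spec_get_base_spirit (name : String) (ingredients_hint : String) (out : String) : Prop := out = get_base_spirit_alt name ingredients_hint
instance (name : String) (ingredients_hint : String) (out : String) : Decidable (Spec_get_base_spirit name ingredients_hint out) := by unfold Spec_get_base_spirit; infer_instance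

-- ===== CLAIM (what is proved, stated in full; the proofs are below) =====
def Claim_equal_get_base_spirit : Prop := ∀ (name : String) (ingredients_hint : String), Dom_get_base_spirit name ingredients_hint → Spec_get_base_spirit name ingredients_hint (get_base_spirit name ingredients_hint)

-- ===== LEMMAS AND PROOFS =====

-- the priorities collected by B's double loop over one text, as a flat list
def hitsOf (t : List Char) : List Nat :=
  (List.range t.length).flatMap (fun i =>
    lensList.filterMap (fun L => kwDict.get? (PySem.List.slice t (some (Int.ofNat i)) (some (Int.ofNat i + Int.ofNat L)))))

lemma foldl_minstep_filterMap {α : Type} (f : α → Option Nat) (ls : List α) (b : Nat) :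
    ls.foldl (fun b L => match f L with | some p => if p < b then p else b | none => b) b
      = (ls.filterMap f).foldl min b := by
  induction ls generalizing b with
  | nil => rfl
  | cons hd tl ih =>
    simp only [List.foldl_cons, List.filterMap_cons]
    cases h : f hd with
    | none => simp [ih]
    | some p =>
      simp only [List.foldl_cons, ih]
      congr 1
      rw [Nat.min_def]
      split_ifs <;> omega

lemma foldl_min_flatMap {α : Type} (g : α → List Nat) (xs : List α) (b : Nat) :
    xs.foldl (fun b x => (g x).foldl min b) b = (xs.flatMap g).foldl min b := by
  induction xs generalizing b with
  | nil => rfl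
  | cons hd tl ih => simp [List.foldl_cons, List.flatMap_cons, List.foldl_append, ih]

lemma scan_eq_foldl_min (t : List Char) (b : Nat) :
    scanChars b t = (hitsOf t).foldl min b := by
  unfold scanChars hitsOf
  rw [← foldl_min_flatMap]
  exact PySem.List.foldl_congr_mem _ _ _ _ (fun b' i _ => foldl_minstep_filterMap _ _ _)

lemma fm_le_init (H : List Nat) (b : Nat) : H.foldl min b ≤ b := by
  induction H generalizing b with
  | nil => exact Nat.le_refl b
  | cons hd tl ih => exact (ih (min b hd)).trans (Nat.min_le_left _ _)

lemma fm_le_mem : ∀ (H : List Nat) (b q : Nat), q ∈ H → H.foldl min b ≤ q := by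
  intro H
  induction H with
  | nil => intro b q h; cases h
  | cons hd tl ih =>
    intro b q h
    rcases List.mem_cons.mp h with rfl | h'
    · exact (fm_le_init tl (min b q)).trans (Nat.min_le_right _ _)
    · exact ih (min b hd) q h'

lemma fm_cases (H : List Nat) (b : Nat) : H.foldl min b = b ∨ H.foldl min b ∈ H := by
  induction H generalizing b with
  | nil => exact Or.inl rfl
  | cons hd tl ih =>
    rcases ih (min b hd) with h | h
    · rw [List.foldl_cons, h]
      rcases Nat.le_or_le b hd with h1 | h1
      · exact Or.inl (Nat.min_eq_left h1)
      · refine Or.inr ?_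
        rw [Nat.min_eq_right h1]
        exact List.mem_cons_self
    · exact Or.inr (List.mem_cons_of_mem _ h)

lemma kw_nodup : kwDict.keys.Nodup := by decide

lemma kw_facts : ∀ p ∈ kwDict.items, p.1.length ∈ lensList ∧ p.1 ≠ [] ∧ p.2 < 8 := by decide

lemma mem_hitsOf (t : List Char) (q : Nat) :
    q ∈ hitsOf t ↔ ∃ kw, (kw, q) ∈ kwDict.items ∧ kw <:+: t := by
  constructor
  · intro h
    rw [hitsOf, List.mem_flatMap] at h
    obtain ⟨i, hi, hq⟩ := h
    rw [List.mem_filterMap] at hq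
    obtain ⟨L, hL, hget⟩ := hq
    simp only [Int.ofNat_eq_natCast, PySem.List.slice_natCast_add] at hget
    refine ⟨_, (PySem.Dict.get?_eq_some_iff_mem_items _ _ _ kw_nodup).mp hget, ?_⟩
    exact ((List.take_prefix L (t.drop i)).isInfix).trans (List.drop_suffix i t).isInfix
  · rintro ⟨kw, hmem, s1, s2, rfl⟩
    obtain ⟨hlen', hne', -⟩ := kw_facts _ hmem
    replace hlen : kw.length ∈ lensList := hlen'
    replace hne : kw ≠ [] := hne'
    rw [hitsOf, List.mem_flatMap]
    refine ⟨s1.length, List.mem_range.mpr ?_, List.mem_filterMap.mpr ⟨kw.length, hlen, ?_⟩⟩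
    · have := List.length_pos_iff.mpr hne
      simp [List.length_append]; omega
    · simp only [Int.ofNat_eq_natCast, PySem.List.slice_natCast_add]
      rw [List.append_assoc, List.drop_left, List.take_left]
      exact (PySem.Dict.get?_eq_some_iff_mem_items _ _ _ kw_nodup).mpr hmem

lemma foldl_min_8 (H : List Nat) (f : Nat → Bool)
    (hmem : ∀ q, q ∈ H ↔ (q < 8 ∧ f q = true)) :
    H.foldl min 8 = (if f 0 then 0 else if f 1 then 1 else if f 2 then 2 else if f 3 then 3
      else if f 4 then 4 else if f 5 then 5 else if f 6 then 6 else if f 7 then 7 else 8) := by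
  have h1 := fm_cases H 8
  have h2 : ∀ q ∈ H, H.foldl min 8 ≤ q := fun q hq => fm_le_mem H 8 q hq
  generalize hR : H.foldl min 8 = r at h1 h2 ⊢
  have key : ∀ k : Nat, k < 8 → f k = true → (∀ j, j < k → f j = false) → r = k := by
    intro k hk8 hfk hprev
    have hk : r ≤ k := h2 k ((hmem k).mpr ⟨hk8, hfk⟩)
    rcases h1 with rfl | hm
    · omega
    · obtain ⟨hr8, hfr⟩ := (hmem r).mp hm
      rcases Nat.lt_or_ge r k with hlt | hge
      · exact absurd hfr (by simp [hprev r hlt])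
      · omega
  split_ifs with f0 f1 f2 f3 f4 f5 f6 f7
  · exact key 0 (by omega) f0 (by omega)
  · exact key 1 (by omega) f1 (by intro j hj; interval_cases j; simp_all)
  · exact key 2 (by omega) f2 (by intro j hj; interval_cases j <;> simp_all)
  · exact key 3 (by omega) f3 (by intro j hj; interval_cases j <;> simp_all)
  · exact key 4 (by omega) f4 (by intro j hj; interval_cases j <;> simp_all)
  · exact key 5 (by omega) f5 (by intro j hj; interval_cases j <;> simp_all)
  · exact key 6 (by omega) f6 (by intro j hj; interval_cases j <;> simp_all)
  · exact key 7 (by omega) f7 (by intro j hj; interval_cases j <;> simp_all)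
  · rcases h1 with rfl | hm
    · rfl
    · obtain ⟨hr8, hfr⟩ := (hmem r).mp hm
      exact absurd hfr (by interval_cases r <;> simp_all)

-- translate A's per-group test into an existential over the group
lemma hit_iff_ex (name ih : String) (ks : List String) :
    pvHit (PySem.Str.lower name) (PySem.Str.lower ih) ks = true ↔
      ∃ x ∈ ks, (x.toList <:+: PySem.Chars.lower name.toList ∨ x.toList <:+: PySem.Chars.lower ih.toList) := by
  simp [pvHit, PySem.Str.toList_lower, PySem.Chars.isIn_iff_infix]

-- pvHit on a keyword group = membership of that group's priority in the collected hits
lemma hit_eq_decide_mem (name ih : String) (j : Nat) (ks : List String)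
    (hks : ∀ kw : List Char, ((kw, j) ∈ kwDict.items ↔ ∃ x ∈ ks, kw = x.toList)) :
    pvHit (PySem.Str.lower name) (PySem.Str.lower ih) ks
      = decide (j ∈ hitsOf (PySem.Chars.lower name.toList) ++ hitsOf (PySem.Chars.lower ih.toList)) := by
  rw [Bool.eq_iff_iff, hit_iff_ex, decide_eq_true_iff, List.mem_append, mem_hitsOf, mem_hitsOf]
  constructor
  · rintro ⟨x, hx, hinf | hinf⟩
    · exact Or.inl ⟨x.toList, (hks _).mpr ⟨x, hx, rfl⟩, hinf⟩
    · exact Or.inr ⟨x.toList, (hks _).mpr ⟨x, hx, rfl⟩, hinf⟩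
  · rintro (⟨kw, hm, hinf⟩ | ⟨kw, hm, hinf⟩)
    · obtain ⟨x, hx, rfl⟩ := (hks _).mp hm
      exact ⟨x, hx, Or.inl hinf⟩
    · obtain ⟨x, hx, rfl⟩ := (hks _).mp hm
      exact ⟨x, hx, Or.inr hinf⟩

lemma keys0 : ∀ kw : List Char, ((kw, 0) ∈ kwDict.items ↔ ∃ x ∈ (["vodka", "russian", "moscow", "bloody mary", "espresso martini", "cosmopolitan"] : List String), kw = x.toList) := by
  intro kw; simp [kwDict]

lemma keys1 : ∀ kw : List Char, ((kw, 1) ∈ kwDict.items ↔ ∃ x ∈ (["gin", "martini", "negroni", "tom collins", "aviation", "gimlet"] : List String), kw = x.toList) := by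
  intro kw; simp [kwDict]

lemma keys2 : ∀ kw : List Char, ((kw, 2) ∈ kwDict.items ↔ ∃ x ∈ (["rum", "mojito", "daiquiri", "mai tai", "pina colada", "cuba"] : List String), kw = x.toList) := by
  intro kw; simp [kwDict]

lemma keys3 : ∀ kw : List Char, ((kw, 3) ∈ kwDict.items ↔ ∃ x ∈ (["whiskey", "whisky", "bourbon", "rye", "scotch", "manhattan", "old fashioned", "mint julep"] : List String), kw = x.toList) := by
  intro kw; simp [kwDict]

lemma keys4 : ∀ kw : List Char, ((kw, 4) ∈ kwDict.items ↔ ∃ x ∈ (["tequila", "mezcal", "margarita", "paloma"] : List String), kw = x.toList) := by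
  intro kw; simp [kwDict]

lemma keys5 : ∀ kw : List Char, ((kw, 5) ∈ kwDict.items ↔ ∃ x ∈ (["brandy", "cognac", "sidecar"] : List String), kw = x.toList) := by
  intro kw; simp [kwDict]

lemma keys6 : ∀ kw : List Char, ((kw, 6) ∈ kwDict.items ↔ ∃ x ∈ (["champagne", "prosecco", "bellini", "mimosa", "french 75"] : List String), kw = x.toList) := by
  intro kw; simp [kwDict]

lemma keys7 : ∀ kw : List Char, ((kw, 7) ∈ kwDict.items ↔ ∃ x ∈ (["aperol", "campari", "americano"] : List String), kw = x.toList) := by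
  intro kw; simp [kwDict]

-- ===== VERDICT (by name: the statement is the Claim_ definition above) =====
theorem get_base_spirit_spec : Claim_equal_get_base_spirit := by
  intro name ih _
  simp only [Spec_get_base_spirit, get_base_spirit, get_base_spirit_alt]
  have hmemH : ∀ q, q ∈ hitsOf (PySem.Chars.lower name.toList) ++ hitsOf (PySem.Chars.lower ih.toList) ↔
      (q < 8 ∧ decide (q ∈ hitsOf (PySem.Chars.lower name.toList) ++ hitsOf (PySem.Chars.lower ih.toList)) = true) := by
    intro q
    constructor
    · intro h
      refine ⟨?_, by simpa using h⟩
      rcases List.mem_append.mp h with h' | h' <;>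
        obtain ⟨kw, hm, -⟩ := (mem_hitsOf _ q).mp h' <;>
        exact (kw_facts _ hm).2.2
    · intro h
      simpa using h.2
  have hfold : scanChars (scanChars 8 (PySem.Chars.lower name.toList)) (PySem.Chars.lower ih.toList)
      = (hitsOf (PySem.Chars.lower name.toList) ++ hitsOf (PySem.Chars.lower ih.toList)).foldl min 8 := by
    rw [scan_eq_foldl_min, scan_eq_foldl_min, List.foldl_append]
  have hchain := foldl_min_8 _ _ hmemH
  show _ = labelsList.getD (scanChars (scanChars 8 (PySem.Chars.lower name.toList)) (PySem.Chars.lower ih.toList)) "Spirit"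
  rw [hfold, hchain,
    hit_eq_decide_mem name ih 0 _ keys0, hit_eq_decide_mem name ih 1 _ keys1,
    hit_eq_decide_mem name ih 2 _ keys2, hit_eq_decide_mem name ih 3 _ keys3,
    hit_eq_decide_mem name ih 4 _ keys4, hit_eq_decide_mem name ih 5 _ keys5,
    hit_eq_decide_mem name ih 6 _ keys6, hit_eq_decide_mem name ih 7 _ keys7]
  split_ifs <;> rfl
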